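-- pv_equiv track=rewrite | github.com/karel-chladek-fimuni/movienator_server | movie_manager.py | get_genre_filter_command
-- ===== SOURCE A (Python) =====
-- def get_genre_filter_command(json_data):
--     def remove_dash(g):
--         return g.replace("-","_").lower()
--
--     def make_select(g,eq=True):
--         equality = "==" if eq else "!="
--         return f"SELECT movie_id FROM movie_genre where genre {equality} \"{g}\" GROUP BY movie_id"
--     # select * from (SELECT DISTINCT movie_id as horror_movie_id FROM movie_genre where genre == "Horror" GROUP BY movie_id) INNER JOIN (SELECT DISTINCT movie_id AS comedy_movie_id FROM movie_genre where genre == "Comedy" GROUP BY movie_id) on horror_movie_id = comedy_movie_id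
--     command = "select distinct id as genre_movie_id from movies"
--     has_where = False
--     genre_filter = json_data["genre_filter"]
--     if("needed" in genre_filter and len(genre_filter["needed"]) > 0):
--         for g in genre_filter["needed"]:
--             if not has_where:
--                 command += " where "
--                 has_where = True
--             else:
--                 command += " and "
--             command += f"id in ({make_select(g,True)})"
--
--     if("forbiden" in genre_filter and len(genre_filter["forbiden"]) > 0):
--         for g in genre_filter["forbiden"]:
--             if not has_where:
--                 command += " where "
--                 has_where = True
--             else:
--                 command += " and "
--             command += f"id not in ({make_select(g,True)})"
--     return command
-- ===== SOURCE B (Python) =====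
-- def get_genre_filter_command(json_data):
--     genre_filter = json_data["genre_filter"]
--
--     def clause(neg, g):
--         sel = f"SELECT movie_id FROM movie_genre where genre == \"{g}\" GROUP BY movie_id"
--         return ("id not in (" if neg else "id in (") + sel + ")"
--
--     def clauses(specs):
--         # recursion over a table of (negated?, genres) specs, peeling one genre at a time
--         if not specs:
--             return []
--         neg, genres = specs[0]
--         if not genres:
--             return clauses(specs[1:])
--         return [clause(neg, genres[0])] + clauses([(neg, genres[1:])] + specs[1:])
--
--     def suffix(cs):
--         # builds the tail of the WHERE clause back-to-front by recursion
--         if not cs: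
--             return ""
--         return " and " + cs[0] + suffix(cs[1:])
--
--     cs = clauses([(False, genre_filter.get("needed", [])),
--                   (True, genre_filter.get("forbiden", []))])
--     base = "select distinct id as genre_movie_id from movies"
--     if not cs:
--         return base
--     return base + " where " + cs[0] + suffix(cs[1:])
-- ===== Notes on version B (the rewrite author's own statement) =====
-- stated objective: alternative
-- what changed: Replaces A's two stateful separator loops (has_where flag mutated across both loops) with pure recursion: clauses are generated by structural recursion over a table of (negated, genres) specs and the WHERE tail is assembled back-to-front by a recursive suffix function.
import Mathlib
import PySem

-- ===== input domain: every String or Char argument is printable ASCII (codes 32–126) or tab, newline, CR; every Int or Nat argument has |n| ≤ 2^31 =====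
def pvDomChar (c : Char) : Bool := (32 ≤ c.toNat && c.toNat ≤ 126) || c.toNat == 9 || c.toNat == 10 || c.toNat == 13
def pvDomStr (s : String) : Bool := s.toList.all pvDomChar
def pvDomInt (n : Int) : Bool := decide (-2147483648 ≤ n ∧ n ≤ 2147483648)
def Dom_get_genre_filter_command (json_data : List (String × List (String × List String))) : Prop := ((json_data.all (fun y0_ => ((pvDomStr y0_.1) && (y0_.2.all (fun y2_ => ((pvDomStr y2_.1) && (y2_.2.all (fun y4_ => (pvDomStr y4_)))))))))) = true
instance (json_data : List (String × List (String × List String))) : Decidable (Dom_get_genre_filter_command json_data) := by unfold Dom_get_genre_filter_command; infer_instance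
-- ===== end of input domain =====

-- B replaces A's two stateful separator loops (shared has_where flag) with pure recursion:
-- clauses come from structural recursion over a table of (negated, genres) specs and the
-- WHERE tail is assembled back-to-front by a recursive suffix function (objective: alternative).


-- ===== PORT A =====
-- make_select(g, eq=True) of A (remove_dash is defined but never used in A; not ported)
def pvMakeSelectA (g : String) (eq : Bool) : String :=
  let equality := if eq then "==" else "!="
  "SELECT movie_id FROM movie_genre where genre " ++ equality ++ " \"" ++ g ++ "\" GROUP BY movie_id"

-- literal port of A; json_data["genre_filter"] raises KeyError when the key is absent
-- (the `none` branch, excluded by Pre_); inside each guarded loop genre_filter["needed"] /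
-- ["forbiden"] is written getD _ [] — identical to the Python lookup since the guard
-- established the key is present.
def get_genre_filter_command (json_data : List (String × List (String × List String))) : String :=
  let command := "select distinct id as genre_movie_id from movies"
  let has_where := false
  match (PySem.Dict.mk json_data).get? "genre_filter" with
  | none => ""   -- Python raises KeyError here; outside Pre_
  | some gfl =>
    let gf := PySem.Dict.mk gfl
    let st :=
      if gf.contains "needed" && decide ((gf.getD "needed" []).length > 0) then
        (gf.getD "needed" []).foldl (fun (st : String × Bool) g =>
          let st := if st.2 = false then (st.1 ++ " where ", true) else (st.1 ++ " and ", st.2)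
          (st.1 ++ "id in (" ++ pvMakeSelectA g true ++ ")", st.2)) (command, has_where)
      else (command, has_where)
    let st :=
      if gf.contains "forbiden" && decide ((gf.getD "forbiden" []).length > 0) then
        (gf.getD "forbiden" []).foldl (fun (st : String × Bool) g =>
          let st := if st.2 = false then (st.1 ++ " where ", true) else (st.1 ++ " and ", st.2)
          (st.1 ++ "id not in (" ++ pvMakeSelectA g true ++ ")", st.2)) st
      else st
    st.1

-- ===== PORT B =====
-- clause(neg, g) of B
def pvClause (neg : Bool) (g : String) : String :=
  let sel := "SELECT movie_id FROM movie_genre where genre == \"" ++ g ++ "\" GROUP BY movie_id"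
  (if neg then "id not in (" else "id in (") ++ sel ++ ")"

-- clauses(specs) of B: recursion over the spec table, peeling one genre at a time
def pvClauses : List (Bool × List String) → List String
  | [] => []
  | (_, []) :: rest => pvClauses rest
  | (neg, g :: gs) :: rest => pvClause neg g :: pvClauses ((neg, gs) :: rest)
termination_by specs => (specs.map (fun p => p.2.length + 1)).sum
decreasing_by all_goals simp; try omega

-- suffix(cs) of B: the WHERE tail, built back-to-front
def pvSuffix : List String → String
  | [] => ""
  | c :: cs => " and " ++ c ++ pvSuffix cs

def get_genre_filter_command_alt (json_data : List (String × List (String × List String))) : String :=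
  match (PySem.Dict.mk json_data).get? "genre_filter" with
  | none => ""   -- Python raises KeyError here; outside Pre_
  | some gfl =>
    let gf := PySem.Dict.mk gfl
    let cs := pvClauses [(false, gf.getD "needed" []), (true, gf.getD "forbiden" [])]
    let base := "select distinct id as genre_movie_id from movies"
    match cs with
    | [] => base
    | c :: rest => base ++ " where " ++ c ++ pvSuffix rest

-- ===== PRECONDITION & SPEC =====
-- Pre_ excludes exactly the inputs where A raises KeyError ("genre_filter" key absent).
def Pre_get_genre_filter_command (json_data : List (String × List (String × List String))) : Prop :=
  ((PySem.Dict.mk json_data).get? "genre_filter").isSome = true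
instance (json_data : List (String × List (String × List String))) : Decidable (Pre_get_genre_filter_command json_data) := by unfold Pre_get_genre_filter_command; infer_instance

def pvWitness_get_genre_filter_command : (List (String × List (String × List String))) :=
  [("genre_filter", [("needed", ["Horror"]), ("forbiden", ["Comedy"])])]

def Spec_get_genre_filter_command (json_data : List (String × List (String × List String))) (out : String) : Prop := out = get_genre_filter_command_alt json_data
instance (json_data : List (String × List (String × List String))) (out : String) : Decidable (Spec_get_genre_filter_command json_data out) := by unfold Spec_get_genre_filter_command; infer_instance

-- ===== CLAIM (what is proved, stated in full; the proofs are below) =====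
def Claim_equal_get_genre_filter_command : Prop := ∀ (json_data : List (String × List (String × List String))), Dom_get_genre_filter_command json_data → Pre_get_genre_filter_command json_data → Spec_get_genre_filter_command json_data (get_genre_filter_command json_data)

-- ===== LEMMAS AND PROOFS =====

-- A's loop step on a fully built condition string
def pvStep (st : String × Bool) (c : String) : String × Bool :=
  let st := if st.2 = false then (st.1 ++ " where ", true) else (st.1 ++ " and ", st.2)
  (st.1 ++ c, st.2)

theorem pvMakeSelect_eq (neg : Bool) (g : String) :
    (if neg then "id not in (" else "id in (") ++ pvMakeSelectA g true ++ ")" = pvClause neg g := by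
  apply String.toList_injective
  cases neg <;> simp [pvMakeSelectA, pvClause]

-- A's loop over genres equals pvStep folded over the clause strings
theorem pvFoldA_map (a : String) (f : String → String) :
    ∀ (l : List String) (st : String × Bool),
      l.foldl (fun (st : String × Bool) g =>
        let st := if st.2 = false then (st.1 ++ " where ", true) else (st.1 ++ " and ", st.2)
        (st.1 ++ a ++ f g ++ ")", st.2)) st
      = (l.map (fun g => a ++ f g ++ ")")).foldl pvStep st := by
  intro l
  induction l with
  | nil => intro st; rfl
  | cons h t ih =>
      intro st
      simp only [List.foldl_cons, List.map_cons]
      rw [← ih]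
      congr 1
      cases hb : st.2 <;> simp [pvStep, hb, String.append_assoc]

-- B's clauses over a spec table is the concatenation of per-spec maps
theorem pvClauses_cons (neg : Bool) (gs : List String) (rest : List (Bool × List String)) :
    pvClauses ((neg, gs) :: rest) = gs.map (pvClause neg) ++ pvClauses rest := by
  induction gs with
  | nil => simp [pvClauses]
  | cons g t ih => simp [pvClauses, ih]

-- B's recursive suffix, prepended to the head, equals A's " and " fold
theorem pvSuffix_foldl : ∀ (cs : List String) (c : String),
    c ++ pvSuffix cs = cs.foldl (fun s x => s ++ " and " ++ x) c := by
  intro cs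
  induction cs with
  | nil => intro c; simp [pvSuffix]
  | cons h t ih =>
      intro c
      simp only [pvSuffix, List.foldl_cons]
      rw [← ih]
      simp [String.append_assoc]

theorem pvRun_true : ∀ (cs : List String) (s : String),
    cs.foldl pvStep (s, true) = (cs.foldl (fun s x => s ++ " and " ++ x) s, true) := by
  intro cs
  induction cs with
  | nil => intro s; rfl
  | cons h t ih => intro s; simp only [List.foldl_cons]; rw [← ih]; rfl

theorem pvRun_spec (conds : List String) (s : String) :
    (conds.foldl pvStep (s, false)).1
      = match conds with
        | [] => s
        | c :: cs => s ++ " where " ++ c ++ pvSuffix cs := by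
  cases conds with
  | nil => rfl
  | cons c cs =>
      show ((c :: cs).foldl pvStep (s, false)).1 = s ++ " where " ++ c ++ pvSuffix cs
      rw [List.foldl_cons, show pvStep (s, false) c = (s ++ " where " ++ c, true) from rfl,
        pvRun_true]
      simp only
      rw [← pvSuffix_foldl]

theorem pvGetD_nil_of_not_contains (gf : PySem.Dict String (List String)) (k : String)
    (h : ¬ gf.contains k = true) : gf.getD k [] = [] := by
  simp [PySem.Dict.contains] at h
  have hfind : List.find? (fun p => p.1 == k) gf.items = none := by
    rw [List.find?_eq_none]
    rintro ⟨a, b⟩ hmem hbeq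
    exact h b (by simpa using (beq_iff_eq.mp hbeq ▸ hmem))
  simp [PySem.Dict.getD, PySem.Dict.get?, hfind]

-- the guard around each loop can be dropped: if it fails, the loop runs over []
theorem pvGuard_drop (gf : PySem.Dict String (List String)) (k : String)
    (F : (String × Bool) → String → (String × Bool)) (st : String × Bool) :
    (if gf.contains k && decide ((gf.getD k []).length > 0) then
      (gf.getD k []).foldl F st else st)
    = (gf.getD k []).foldl F st := by
  by_cases hc : gf.contains k = true
  · cases hl : gf.getD k [] with
    | nil => simp
    | cons x xs => simp [hc]
  · simp [pvGetD_nil_of_not_contains gf k hc]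

-- ===== VERDICT (by name: the statement is the Claim_ definition above) =====
theorem get_genre_filter_command_spec : Claim_equal_get_genre_filter_command := by
  intro json_data _ hpre
  unfold Spec_get_genre_filter_command
  unfold Pre_get_genre_filter_command at hpre
  unfold get_genre_filter_command get_genre_filter_command_alt
  cases hget : (PySem.Dict.mk json_data).get? "genre_filter" with
  | none => simp [hget] at hpre
  | some gfl =>
      simp only
      rw [pvGuard_drop, pvGuard_drop, pvFoldA_map, pvFoldA_map, ← List.foldl_append,
        pvClauses_cons, pvClauses_cons, pvClauses]
      have h1 : ∀ (l : List String),
          l.map (fun g => "id in (" ++ pvMakeSelectA g true ++ ")") = l.map (pvClause false) := by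
        intro l
        apply List.map_congr_left
        intro g _
        simpa using pvMakeSelect_eq false g
      have h2 : ∀ (l : List String),
          l.map (fun g => "id not in (" ++ pvMakeSelectA g true ++ ")") = l.map (pvClause true) := by
        intro l
        apply List.map_congr_left
        intro g _
        simpa using pvMakeSelect_eq true g
      rw [pvRun_spec, h1, h2, List.append_nil]
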